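-- pv_equiv track=rewrite | github.com/Marshmallow703/job-tracker-2026spring | src/fetch_lever.py | _location_ok
-- ===== SOURCE A (Python) =====
-- def _location_ok(location: str, rules: dict) -> bool:
--     if not location:
--         return True  # missing → keep for manual review
--     loc = location.lower()
--     for ex in rules.get("location_exclude_strict", []):
--         if ex.lower() in loc:
--             # Drop unless there is also a US/include signal in the same string
--             for inc in rules.get("location_include", []):
--                 if inc.lower() in loc:
--                     return True
--             return False
--     for inc in rules.get("location_include", []):
--         if inc.lower() in loc:
--             return True
--     return False  # location present but no US signal → drop
-- ===== SOURCE B (Python) =====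
-- def _location_ok(location: str, rules: dict) -> bool:
--     if not location:
--         return True  # missing -> keep for manual review
--     loc = location.lower()
--     # A's exclude branch returns the same value as the final include scan,
--     # so the result for a non-empty location is exactly the include check.
--     return any(inc.lower() in loc for inc in rules.get("location_include", []))
-- ===== Notes on version B (the rewrite author's own statement) =====
-- stated objective: simpler
-- what changed: The exclude loop is dropped entirely: in A a matching exclude entry leads to the same include scan as the fall-through path, so B is a single any() over the include list instead of A's nested exclude-then-include scans.
import Mathlib
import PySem

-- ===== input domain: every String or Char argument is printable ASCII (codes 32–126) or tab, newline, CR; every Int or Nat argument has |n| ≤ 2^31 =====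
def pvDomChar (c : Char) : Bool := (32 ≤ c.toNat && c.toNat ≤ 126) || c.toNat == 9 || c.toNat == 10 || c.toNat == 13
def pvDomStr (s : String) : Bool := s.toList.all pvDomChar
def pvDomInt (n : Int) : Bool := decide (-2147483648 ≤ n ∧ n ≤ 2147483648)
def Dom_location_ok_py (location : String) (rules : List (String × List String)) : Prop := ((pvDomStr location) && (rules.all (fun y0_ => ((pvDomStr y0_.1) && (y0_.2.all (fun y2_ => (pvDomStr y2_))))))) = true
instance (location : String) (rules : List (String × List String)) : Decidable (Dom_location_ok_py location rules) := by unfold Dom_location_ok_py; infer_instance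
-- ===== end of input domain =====

-- B drops A's exclude loop: in A a matching exclude entry triggers the same include scan
-- as the fall-through path, so the result is the include check alone. Return values only.

-- ===== PORT A =====
-- 'for inc in rules.get("location_include", []): if inc.lower() in loc: return True / return False'
def pvAIncLoop (loc : String) : List String → Bool
  | [] => false
  | inc :: rest =>
      if PySem.Str.isIn (PySem.Str.lower inc) loc then true else pvAIncLoop loc rest

-- 'for ex in rules.get("location_exclude_strict", []): if ex.lower() in loc: <inner include loop>'
def pvAExcLoop (loc : String) (incs : List String) : List String → Bool
  | [] => pvAIncLoop loc incs
  | ex :: rest =>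
      if PySem.Str.isIn (PySem.Str.lower ex) loc then pvAIncLoop loc incs
      else pvAExcLoop loc incs rest

def location_ok_py (location : String) (rules : List (String × List String)) : Bool :=
  if location == "" then true
  else
    let loc := PySem.Str.lower location
    pvAExcLoop loc (PySem.Dict.getD (PySem.Dict.ofList rules) "location_include" [])
      (PySem.Dict.getD (PySem.Dict.ofList rules) "location_exclude_strict" [])

-- ===== PORT B =====
def location_ok_py_alt (location : String) (rules : List (String × List String)) : Bool :=
  if location == "" then true
  else
    let loc := PySem.Str.lower location
    (PySem.Dict.getD (PySem.Dict.ofList rules) "location_include" []).any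
      (fun inc => PySem.Str.isIn (PySem.Str.lower inc) loc)

-- ===== PRECONDITION & SPEC =====
def Spec_location_ok_py (location : String) (rules : List (String × List String)) (out : Bool) : Prop := out = location_ok_py_alt location rules
instance (location : String) (rules : List (String × List String)) (out : Bool) : Decidable (Spec_location_ok_py location rules out) := by unfold Spec_location_ok_py; infer_instance

-- ===== CLAIM (what is proved, stated in full; the proofs are below) =====
def Claim_equal_location_ok_py : Prop := ∀ (location : String) (rules : List (String × List String)), Dom_location_ok_py location rules → Spec_location_ok_py location rules (location_ok_py location rules)

-- ===== LEMMAS AND PROOFS =====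
theorem pvAIncLoop_eq_any (loc : String) (incs : List String) :
    pvAIncLoop loc incs = incs.any (fun inc => PySem.Str.isIn (PySem.Str.lower inc) loc) := by
  induction incs with
  | nil => rfl
  | cons i t ih => simp [pvAIncLoop, ih, List.any_cons]

theorem pvAExcLoop_eq_inc (loc : String) (incs : List String) (exs : List String) :
    pvAExcLoop loc incs exs = pvAIncLoop loc incs := by
  induction exs with
  | nil => rfl
  | cons e t ih => simp [pvAExcLoop, ih]

-- ===== VERDICT (by name: the statement is the Claim_ definition above) =====
theorem location_ok_py_spec : Claim_equal_location_ok_py := by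
  intro location rules _
  unfold Spec_location_ok_py location_ok_py location_ok_py_alt
  split_ifs with h
  · rfl
  · simp only [pvAExcLoop_eq_inc, pvAIncLoop_eq_any]
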